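-- pv_equiv track=rewrite | github.com/alekseikorobov/python | leetcode/codes/problem_2529_maximum_count_of_positive_integer_and_negative_integer.py | get_first_index_pos
-- ===== SOURCE A (Python) =====
-- def get_first_index_pos(nums):
--     l,r = 0,len(nums)
--     while l < r:
--         m = l + (r - l) // 2
--         if nums[m] >= 0:
--             if m - 1 >= 0:
--                 if nums[m-1] < 0:
--                     return m
--                 else:
--                     r = m
--             else:
--                 return m
--         elif nums[m] < 0:
--             l = m + 1
--     return -1
-- ===== SOURCE B (Python) =====
-- def get_first_index_pos(nums):
--     def go(sub, offset):
--         if not sub: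
--             return -1
--         m = len(sub) // 2
--         if sub[m] < 0:
--             return go(sub[m + 1:], offset + m + 1)
--         if m > 0 and sub[m - 1] >= 0:
--             return go(sub[:m], offset)
--         return offset + m
--     return go(nums, 0)
-- ===== Notes on version B (the rewrite author's own statement) =====
-- stated objective: alternative
-- what changed: Replaces the while-loop over mutable index bounds l,r by a recursion over physical subarrays: a helper takes the current sublist (built with slicing) plus an offset accumulator, tests the negative case first and flattens the nested ifs, so no bound pair or in-place index arithmetic remains; it returns A's exact value on every input.
import Mathlib
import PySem

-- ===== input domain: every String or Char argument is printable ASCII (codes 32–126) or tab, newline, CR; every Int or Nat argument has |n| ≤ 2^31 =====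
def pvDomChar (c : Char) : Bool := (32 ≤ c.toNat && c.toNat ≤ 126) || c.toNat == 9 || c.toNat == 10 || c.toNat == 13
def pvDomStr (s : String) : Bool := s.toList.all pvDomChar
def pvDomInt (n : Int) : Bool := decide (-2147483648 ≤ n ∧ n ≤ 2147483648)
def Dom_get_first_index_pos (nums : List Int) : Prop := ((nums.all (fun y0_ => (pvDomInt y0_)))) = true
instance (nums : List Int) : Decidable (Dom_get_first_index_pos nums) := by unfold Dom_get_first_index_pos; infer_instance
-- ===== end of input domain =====

-- B replaces A's while-loop over mutable index bounds by a recursion over sliced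
-- subarrays with an offset accumulator; same return value on every input.

-- ===== PORT A =====
-- A's loop: l, r are the Python ints (always 0 ≤ l ≤ r ≤ len(nums), so Nat);
-- nums[m] is ported with PySem.List.pyGetD (the index is always in range here);
-- m = l + (r - l) // 2 is written out at each use.
def aLoop (nums : List Int) (l r : Nat) : Int :=
  if _h : l < r then
    if PySem.List.pyGetD nums ((l + (r - l) / 2 : Nat) : Int) 0 ≥ 0 then
      if 1 ≤ l + (r - l) / 2 then
        if PySem.List.pyGetD nums (((l + (r - l) / 2 : Nat) : Int) - 1) 0 < 0 then ((l + (r - l) / 2 : Nat) : Int)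
        else aLoop nums l (l + (r - l) / 2)
      else ((l + (r - l) / 2 : Nat) : Int)
    else  -- elif nums[m] < 0 (exhaustive, since the first test failed)
      aLoop nums (l + (r - l) / 2 + 1) r
  else -1
termination_by r - l
decreasing_by all_goals omega

def get_first_index_pos (nums : List Int) : Int := aLoop nums 0 nums.length

-- ===== PORT B =====
-- go(sub, offset) from Source B: recursion over the sliced sublist; sub[m+1:] and
-- sub[:m] are PySem.List.slice; m = len(sub) // 2 is written out at each use.
def goB (sub : List Int) (offset : Nat) : Int :=
  if _h : sub.isEmpty then -1
  else if PySem.List.pyGetD sub ((sub.length / 2 : Nat) : Int) 0 < 0 then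
    goB (PySem.List.slice sub (some ((sub.length / 2 + 1 : Nat) : Int)) none) (offset + sub.length / 2 + 1)
  else if 0 < sub.length / 2 ∧ PySem.List.pyGetD sub (((sub.length / 2 : Nat) : Int) - 1) 0 ≥ 0 then
    goB (PySem.List.slice sub none (some ((sub.length / 2 : Nat) : Int))) offset
  else ((offset + sub.length / 2 : Nat) : Int)
termination_by sub.length
decreasing_by
  · rw [PySem.List.slice_from_natCast]
    simp only [List.length_drop]
    have : sub.length ≠ 0 := by simpa [List.isEmpty_iff_length_eq_zero] using _h
    omega
  · rw [PySem.List.slice_to_natCast]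
    simp only [List.length_take]
    have : sub.length ≠ 0 := by simpa [List.isEmpty_iff_length_eq_zero] using _h
    omega

def get_first_index_pos_alt (nums : List Int) : Int := goB nums 0

-- ===== PRECONDITION & SPEC =====
def Spec_get_first_index_pos (nums : List Int) (out : Int) : Prop := out = get_first_index_pos_alt nums
instance (nums : List Int) (out : Int) : Decidable (Spec_get_first_index_pos nums out) := by unfold Spec_get_first_index_pos; infer_instance

-- ===== CLAIM (what is proved, stated in full; the proofs are below) =====
def Claim_equal_get_first_index_pos : Prop := ∀ (nums : List Int), Dom_get_first_index_pos nums → Spec_get_first_index_pos nums (get_first_index_pos nums)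

-- ===== LEMMAS AND PROOFS =====

-- Elements of the sub-window (nums.drop l).take (r - l) are nums shifted by l.
lemma window_getD (nums : List Int) (l r i : Nat) (hr : r ≤ nums.length) (hi : i < r - l) :
    ((nums.drop l).take (r - l)).getD i 0 = nums.getD (l + i) 0 := by
  have h1 : i < ((nums.drop l).take (r - l)).length := by
    simp only [List.length_take, List.length_drop]; omega
  have h2 : l + i < nums.length := by omega
  rw [List.getD_eq_getElem _ _ h1, List.getD_eq_getElem _ _ h2]
  rw [List.getElem_take, List.getElem_drop]

-- The invariant that relates A's bound pair (l, r) to B's window-plus-offset: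
-- whenever A has moved l past 0, nums[l-1] was the negative midpoint that moved it.
lemma aLoop_eq_goB (nums : List Int) :
    ∀ (n l r : Nat), r - l ≤ n → l ≤ r → r ≤ nums.length →
      (l = 0 ∨ nums.getD (l - 1) 0 < 0) →
      aLoop nums l r = goB ((nums.drop l).take (r - l)) l := by
  intro n
  induction n with
  | zero =>
    intro l r hn hlr hrlen _
    have hrl : r - l = 0 := by omega
    rw [aLoop, dif_neg (by omega), goB, dif_pos (by simp [hrl])]
  | succ n ih =>
    intro l r hn hlr hrlen hinv
    by_cases hlt : l < r
    · set sub := (nums.drop l).take (r - l) with hsub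
      have hlen : sub.length = r - l := by
        rw [hsub]; simp only [List.length_take, List.length_drop]; omega
      have hne : ¬ sub.isEmpty := by
        rw [List.isEmpty_iff_length_eq_zero, hlen]; omega
      have hm : sub.length / 2 = (r - l) / 2 := by rw [hlen]
      have hmlt : (r - l) / 2 < r - l := by omega
      have hmid : l + (r - l) / 2 < nums.length := by omega
      have hgetm : PySem.List.pyGetD sub (((r - l) / 2 : Nat) : Int) 0
          = nums.getD (l + (r - l) / 2) 0 := by
        rw [PySem.List.pyGetD_natCast, hsub, window_getD nums l r _ hrlen hmlt]
      have hgetmA : PySem.List.pyGetD nums ((l + (r - l) / 2 : Nat) : Int) 0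
          = nums.getD (l + (r - l) / 2) 0 := PySem.List.pyGetD_natCast ..
      rw [aLoop, dif_pos hlt, goB, dif_neg hne, hm]
      by_cases hx : nums.getD (l + (r - l) / 2) 0 < 0
      · -- midpoint negative: A moves l past it, B recurses on the right slice
        have hAlt : ¬ PySem.List.pyGetD nums ((l + (r - l) / 2 : Nat) : Int) 0 ≥ 0 := by
          rw [hgetmA]; omega
        have hBneg : PySem.List.pyGetD sub (((r - l) / 2 : Nat) : Int) 0 < 0 := by
          rw [hgetm]; exact hx
        rw [if_neg hAlt, if_pos hBneg, PySem.List.slice_from_natCast, hsub,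
          List.drop_take, List.drop_drop]
        have hdt : (nums.drop (l + ((r - l) / 2 + 1))).take (r - l - ((r - l) / 2 + 1))
            = (nums.drop (l + (r - l) / 2 + 1)).take (r - (l + (r - l) / 2 + 1)) := by
          have e1 : l + ((r - l) / 2 + 1) = l + (r - l) / 2 + 1 := by omega
          have e2 : r - l - ((r - l) / 2 + 1) = r - (l + (r - l) / 2 + 1) := by omega
          rw [e1, e2]
        rw [hdt]
        exact ih (l + (r - l) / 2 + 1) r (by omega) (by omega) hrlen
          (Or.inr (by simpa using hx))
      · have hAge : PySem.List.pyGetD nums ((l + (r - l) / 2 : Nat) : Int) 0 ≥ 0 := by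
          rw [hgetmA]; omega
        have hBnn : ¬ PySem.List.pyGetD sub (((r - l) / 2 : Nat) : Int) 0 < 0 := by
          rw [hgetm]; omega
        rw [if_pos hAge, if_neg hBnn]
        by_cases h1 : 1 ≤ l + (r - l) / 2
        · rw [if_pos h1]
          have hgetpA : PySem.List.pyGetD nums (((l + (r - l) / 2 : Nat) : Int) - 1) 0
              = nums.getD (l + (r - l) / 2 - 1) 0 := by
            have e : ((l + (r - l) / 2 : Nat) : Int) - 1 = ((l + (r - l) / 2 - 1 : Nat) : Int) := by omega
            rw [e, PySem.List.pyGetD_natCast]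
          have hgetp : 0 < (r - l) / 2 →
              PySem.List.pyGetD sub ((((r - l) / 2 : Nat) : Int) - 1) 0
                = nums.getD (l + (r - l) / 2 - 1) 0 := by
            intro hpos
            have e : (((r - l) / 2 : Nat) : Int) - 1 = (((r - l) / 2 - 1 : Nat) : Int) := by omega
            have hip : (r - l) / 2 - 1 < r - l := by omega
            rw [e, PySem.List.pyGetD_natCast, hsub, window_getD nums l r _ hrlen hip]
            have e2 : l + ((r - l) / 2 - 1) = l + (r - l) / 2 - 1 := by omega
            rw [e2]
          by_cases hprev : nums.getD (l + (r - l) / 2 - 1) 0 < 0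
          · -- previous element negative: both return the midpoint index
            have hc2 : ¬ (0 < (r - l) / 2 ∧
                PySem.List.pyGetD sub ((((r - l) / 2 : Nat) : Int) - 1) 0 ≥ 0) := by
              rintro ⟨hpos, hge⟩
              rw [hgetp hpos] at hge; omega
            rw [if_pos (by rw [hgetpA]; exact hprev), if_neg hc2]
          · -- previous element nonnegative: A shrinks r to m; B recurses on the left slice
            have hmpos : 0 < (r - l) / 2 := by
              rcases hinv with h0 | hneg
              · omega
              · by_contra hz
                have e : l + (r - l) / 2 - 1 = l - 1 := by omega
                rw [e] at hprev; exact hprev hneg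
            have hc2 : 0 < (r - l) / 2 ∧
                PySem.List.pyGetD sub ((((r - l) / 2 : Nat) : Int) - 1) 0 ≥ 0 :=
              ⟨hmpos, by rw [hgetp hmpos]; omega⟩
            rw [if_neg (by rw [hgetpA]; exact hprev), if_pos hc2,
              PySem.List.slice_to_natCast, hsub, List.take_take,
              min_eq_left (by omega : (r - l) / 2 ≤ r - l)]
            have e : (nums.drop l).take ((r - l) / 2)
                = (nums.drop l).take (l + (r - l) / 2 - l) := by
              have : (r - l) / 2 = l + (r - l) / 2 - l := by omega
              rw [← this]
            rw [e]
            exact ih l (l + (r - l) / 2) (by omega) (by omega) (by omega) hinv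
        · -- l = 0 and the midpoint is index 0: both return 0
          have hc2 : ¬ (0 < (r - l) / 2 ∧
              PySem.List.pyGetD sub ((((r - l) / 2 : Nat) : Int) - 1) 0 ≥ 0) := by
            rintro ⟨hpos, -⟩; omega
          rw [if_neg h1, if_neg hc2]
    · -- window empty: both sides return -1
      rw [aLoop, dif_neg hlt, goB,
        dif_pos (by rw [List.isEmpty_iff_length_eq_zero]; simp only [List.length_take, List.length_drop]; omega)]

-- ===== VERDICT (by name: the statement is the Claim_ definition above) =====
theorem get_first_index_pos_spec : Claim_equal_get_first_index_pos := by
  intro nums _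
  unfold Spec_get_first_index_pos get_first_index_pos get_first_index_pos_alt
  have := aLoop_eq_goB nums nums.length 0 nums.length (by omega) (by omega) le_rfl (Or.inl rfl)
  simpa using this
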